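-- pv_equiv track=rewrite | github.com/APiTJLillo/Anarchy-Inference | testing/fuzzing/generators/mutation_generator.py | _find_token_boundaries
-- ===== SOURCE A (Python) =====
-- from typing import Dict, List, Any, Optional, Tuple
--
-- def _find_token_boundaries(content: str) -> List[Tuple[int, int]]:
--     """Find token boundaries in the content.
--
--     Args:
--         content: Content to analyze
--
--     Returns:
--         List of (start, end) positions for tokens
--     """
--     # This is a simplified implementation; a real implementation would use a lexer
--     boundaries = []
--
--     # Simple whitespace-based tokenization
--     in_token = False
--     token_start = 0
--
--     for i, char in enumerate(content):
--         if char.isspace():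
--             if in_token:
--                 boundaries.append((token_start, i))
--                 in_token = False
--         else:
--             if not in_token:
--                 token_start = i
--                 in_token = True
--
--     # Handle the last token
--     if in_token:
--         boundaries.append((token_start, len(content)))
--
--     return boundaries
-- ===== SOURCE B (Python) =====
-- from itertools import groupby
-- from typing import List, Tuple
--
-- def _find_token_boundaries(content: str) -> List[Tuple[int, int]]:
--     """Find token boundaries (start, end) of whitespace-delimited tokens."""
--     boundaries = []
--     for is_space, group in groupby(enumerate(content), key=lambda t: t[1].isspace()):
--         if not is_space:
--             g = list(group)
--             boundaries.append((g[0][0], g[-1][0] + 1))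
--     return boundaries
-- ===== Notes on version B (the rewrite author's own statement) =====
-- stated objective: idiomatic
-- what changed: Replaced the explicit in_token/token_start state machine with itertools.groupby over enumerate(content) keyed on char.isspace(), emitting (first_index, last_index+1) for each non-space run.
import Mathlib
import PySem

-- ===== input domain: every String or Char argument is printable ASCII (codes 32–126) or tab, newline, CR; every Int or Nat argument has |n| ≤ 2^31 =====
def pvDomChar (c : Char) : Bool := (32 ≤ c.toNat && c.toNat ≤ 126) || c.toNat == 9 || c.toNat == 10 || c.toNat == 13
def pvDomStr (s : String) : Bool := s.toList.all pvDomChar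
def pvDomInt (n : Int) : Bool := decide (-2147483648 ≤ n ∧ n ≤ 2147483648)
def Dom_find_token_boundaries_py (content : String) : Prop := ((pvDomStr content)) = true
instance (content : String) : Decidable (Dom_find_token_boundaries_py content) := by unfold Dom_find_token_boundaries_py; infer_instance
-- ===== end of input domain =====

-- B replaces A's explicit in_token/token_start state machine by grouping maximal
-- runs keyed on isspace (groupby) and emitting (first_index, last_index + 1) per
-- non-space run; same O(n) cost, more idiomatic decomposition.

-- ===== PORT A =====
-- the for-loop over enumerate(content) threading (boundaries, in_token, token_start)
def pvALoop : List Char → Int → (List (Int × Int) × Bool × Int) → (List (Int × Int) × Bool × Int)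
  | [], _, st => st
  | c :: cs, i, (bds, inTok, ts) =>
    if PySem.Chars.isspace c then
      if inTok then pvALoop cs (i + 1) (bds ++ [(ts, i)], false, ts)
      else pvALoop cs (i + 1) (bds, inTok, ts)
    else
      if !inTok then pvALoop cs (i + 1) (bds, true, i)
      else pvALoop cs (i + 1) (bds, inTok, ts)

def find_token_boundaries_py (content : String) : List (Int × Int) :=
  let st := pvALoop content.toList 0 ([], false, 0)
  -- Handle the last token
  if st.2.1 then st.1 ++ [(st.2.2, (content.toList.length : Int))] else st.1

-- ===== PORT B =====
-- groupby(enumerate(content), key=isspace): successive maximal runs; a non-space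
-- run starting at index i of length 1 + |takeWhile nonspace| yields (i, i + len).
def pvBLoop : List Char → Int → List (Int × Int)
  | [], _ => []
  | c :: cs, i =>
    if PySem.Chars.isspace c then pvBLoop cs (i + 1)
    else
      let tok := cs.takeWhile (fun d => !PySem.Chars.isspace d)
      (i, i + 1 + (tok.length : Int)) ::
        pvBLoop (cs.dropWhile (fun d => !PySem.Chars.isspace d)) (i + 1 + (tok.length : Int))
termination_by cs _ => cs.length
decreasing_by
  · simp
  · have := List.length_dropWhile_le (fun d => !PySem.Chars.isspace d) cs; simp; omega

def find_token_boundaries_py_alt (content : String) : List (Int × Int) :=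
  pvBLoop content.toList 0

-- ===== PRECONDITION & SPEC =====
def Spec_find_token_boundaries_py (content : String) (out : List (Int × Int)) : Prop := out = find_token_boundaries_py_alt content
instance (content : String) (out : List (Int × Int)) : Decidable (Spec_find_token_boundaries_py content out) := by unfold Spec_find_token_boundaries_py; infer_instance

-- ===== CLAIM (what is proved, stated in full; the proofs are below) =====
def Claim_equal_find_token_boundaries_py : Prop := ∀ (content : String), Dom_find_token_boundaries_py content → Spec_find_token_boundaries_py content (find_token_boundaries_py content)

-- ===== LEMMAS AND PROOFS =====

-- finalization of A's state at total length n
def pvAFin (st : List (Int × Int) × Bool × Int) (n : Int) : List (Int × Int) :=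
  if st.2.1 then st.1 ++ [(st.2.2, n)] else st.1

-- joint invariant: outside a token A's remainder is B's; inside a token the open
-- token closes at i + |takeWhile nonspace| and the rest is B's on the dropWhile.
theorem pvJoint (cs : List Char) :
    (∀ (i : Int) (acc : List (Int × Int)) (t : Int),
      pvAFin (pvALoop cs i (acc, false, t)) (i + cs.length) = acc ++ pvBLoop cs i) ∧
    (∀ (i : Int) (acc : List (Int × Int)) (t : Int),
      pvAFin (pvALoop cs i (acc, true, t)) (i + cs.length) =
        acc ++ (t, i + ((cs.takeWhile (fun d => !PySem.Chars.isspace d)).length : Int)) ::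
          pvBLoop (cs.dropWhile (fun d => !PySem.Chars.isspace d))
            (i + ((cs.takeWhile (fun d => !PySem.Chars.isspace d)).length : Int))) := by
  induction cs with
  | nil => constructor <;> intro i acc t <;> simp [pvALoop, pvBLoop, pvAFin]
  | cons c cs ih =>
    obtain ⟨ihF, ihT⟩ := ih
    have hlen : ∀ (i : Int), i + ((cs.length + 1 : Nat) : Int) = (i + 1) + (cs.length : Int) :=
      fun i => by push_cast; ring
    constructor <;> intro i acc t
    · by_cases hs : PySem.Chars.isspace c
      · simp only [List.length_cons, pvALoop, pvBLoop, hs, reduceIte]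
        rw [hlen i]
        exact ihF (i + 1) acc t
      · simp only [List.length_cons, pvALoop, pvBLoop, hs, Bool.false_eq_true, Bool.not_false,
          reduceIte]
        rw [hlen i, ihT (i + 1) acc i]
    · by_cases hs : PySem.Chars.isspace c
      · simp only [List.length_cons, pvALoop, hs, reduceIte]
        rw [hlen i, ihF (i + 1) (acc ++ [(t, i)]) t]
        simp [pvBLoop, hs]
      · simp only [List.length_cons, pvALoop, hs, Bool.false_eq_true, Bool.not_true, reduceIte]
        rw [hlen i, ihT (i + 1) acc t]
        simp only [List.takeWhile_cons, List.dropWhile_cons, hs, Bool.not_false, reduceIte,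
          List.length_cons]
        congr 3 <;> push_cast <;> ring

-- ===== VERDICT (by name: the statement is the Claim_ definition above) =====
theorem find_token_boundaries_py_spec : Claim_equal_find_token_boundaries_py := by
  intro content _
  unfold Spec_find_token_boundaries_py find_token_boundaries_py find_token_boundaries_py_alt
  have h := (pvJoint content.toList).1 0 [] 0
  simpa [pvAFin] using h
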